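-- pv_equiv track=rewrite | github.com/ericwzc/tools | algorithm/bool/boolcut.py | grpbyones
-- ===== SOURCE A (Python) =====
-- def ones(lst):
--     tmp = [i for i in lst if i == '1']
--     return len(tmp)
--
-- def grpbyones(lst):
--     memo = {}
--     for i in lst:
--         num = ones(i)
--         if num not in memo:
--             memo[num] = []
--         memo[num].append(i)
--     return [memo[i] for i in sorted(memo.keys())]
-- ===== SOURCE B (Python) =====
-- def ones(lst):
--     tmp = [i for i in lst if i == '1']
--     return len(tmp)
--
-- def grpbyones(lst):
--     ks = sorted({ones(x) for x in lst})
--     return [[x for x in lst if ones(x) == k] for k in ks]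
-- ===== Notes on version B (the rewrite author's own statement) =====
-- stated objective: simpler
-- what changed: B replaces the single-pass dict-of-lists accumulation with a two-phase comprehension: compute the sorted set of distinct ones-counts, then filter the list once per key.
import Mathlib
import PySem

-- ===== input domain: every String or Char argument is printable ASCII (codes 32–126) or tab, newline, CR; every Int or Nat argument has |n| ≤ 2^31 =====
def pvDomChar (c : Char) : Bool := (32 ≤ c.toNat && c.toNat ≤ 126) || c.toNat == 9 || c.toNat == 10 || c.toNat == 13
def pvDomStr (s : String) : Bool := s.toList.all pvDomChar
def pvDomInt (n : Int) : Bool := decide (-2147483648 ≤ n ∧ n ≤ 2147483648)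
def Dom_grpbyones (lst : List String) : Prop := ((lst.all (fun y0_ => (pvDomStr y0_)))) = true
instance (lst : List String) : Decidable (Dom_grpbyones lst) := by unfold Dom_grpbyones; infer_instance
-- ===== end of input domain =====

-- B replaces A's single-pass dict-of-lists grouping by: sorted distinct ones-counts, then one filter per key (simpler, not faster).


-- ===== PORT A =====
-- ones(lst): [i for i in lst if i == '1'] then len — shared helper, identical in Source A and Source B
def ones (s : String) : Int := ((s.toList.filter (fun c => c == '1')).length : Int)

def grpbyones (lst : List String) : List (List String) :=
  let memo : PySem.Dict Int (List String) :=
    lst.foldl (fun memo i =>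
      let num := ones i
      let memo := if memo.contains num then memo else memo.insert num ([] : List String)
      memo.insert num (memo.getD num [] ++ [i])) PySem.Dict.empty
  (PySem.List.sorted memo.keys (fun k => k) false).map (fun k => memo.getD k [])

-- ===== PORT B =====
def grpbyones_alt (lst : List String) : List (List String) :=
  let ks := PySem.List.sorted (PySem.Set.ofList (lst.map ones)) (fun k => k) false
  ks.map (fun k => lst.filter (fun x => ones x == k))

-- ===== PRECONDITION & SPEC =====
def Spec_grpbyones (lst : List String) (out : List (List String)) : Prop := out = grpbyones_alt lst
instance (lst : List String) (out : List (List String)) : Decidable (Spec_grpbyones lst out) := by unfold Spec_grpbyones; infer_instance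

-- ===== CLAIM (what is proved, stated in full; the proofs are below) =====
def Claim_equal_grpbyones : Prop := ∀ (lst : List String), Dom_grpbyones lst → Spec_grpbyones lst (grpbyones lst)

-- ===== LEMMAS AND PROOFS =====

-- A's loop body (setdefault-then-append) is exactly the modify-by-key step
theorem grpbyones_step_eq (d : PySem.Dict Int (List String)) (i : String) :
    (let num := ones i
     let d1 := if d.contains num then d else d.insert num ([] : List String)
     d1.insert num (d1.getD num [] ++ [i]))
    = d.modify (ones i) [] (· ++ [i]) := by
  dsimp only
  by_cases h : d.contains (ones i)
  · simp [h, PySem.Dict.modify]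
  · rw [if_neg h, PySem.Dict.getD_insert_self, PySem.Dict.insert_insert_self]
    have hc : d.contains (ones i) = false := by simpa using h
    simp [PySem.Dict.modify, PySem.Dict.getD_of_not_contains, hc]

theorem grpbyones_memo_eq (lst : List String) :
    lst.foldl (fun memo i =>
      let num := ones i
      let memo := if memo.contains num then memo else memo.insert num ([] : List String)
      memo.insert num (memo.getD num [] ++ [i])) PySem.Dict.empty
    = lst.foldl (fun d i => d.modify (ones i) [] (· ++ [i])) PySem.Dict.empty := by
  congr 1
  funext d i
  exact grpbyones_step_eq d i

-- value stored under each key = the filter of lst by that ones-count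
theorem grpbyones_getD (lst : List String) (c : Int) :
    (lst.foldl (fun d i => d.modify (ones i) [] (· ++ [i]))
        (PySem.Dict.empty : PySem.Dict Int (List String))).getD c []
    = lst.filter (fun x => ones x == c) := by
  have h := PySem.Dict.getD_foldl_modify_append
      (l := lst.map (fun x => (ones x, x)))
      (d := (PySem.Dict.empty : PySem.Dict Int (List String))) (c := c)
  rw [List.foldl_map] at h
  simp only [PySem.Dict.getD_empty, List.nil_append] at h
  rw [h, List.filter_map, List.map_map]
  simp [Function.comp_def]

-- keys of the grouping loop, in insertion order, are the distinct ones-counts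
theorem grpbyones_keys (lst : List String) :
    (lst.foldl (fun d i => d.modify (ones i) [] (· ++ [i]))
        (PySem.Dict.empty : PySem.Dict Int (List String))).keys
    = PySem.Set.ofList (lst.map ones) := by
  have h := PySem.Dict.keys_foldl_modify_key (l := lst) (key := ones)
      (d0 := ([] : List String)) (f := fun (_ : PySem.Dict Int (List String)) (x : String) (v : List String) => v ++ [x])
      (d := (PySem.Dict.empty : PySem.Dict Int (List String)))
  simpa [PySem.Dict.keys_empty, PySem.Set.update, PySem.Set.ofList_eq_foldl] using h

-- ===== VERDICT (by name: the statement is the Claim_ definition above) =====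
theorem grpbyones_spec : Claim_equal_grpbyones := by
  intro lst _
  unfold Spec_grpbyones grpbyones grpbyones_alt
  simp only [grpbyones_memo_eq, grpbyones_keys]
  apply List.map_congr_left
  intro k _
  exact grpbyones_getD lst k
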